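-- pv_equiv track=rewrite | github.com/materialsproject/pyrho | src/pyrho/core/chargeDensity.py | multiply_aug
-- ===== SOURCE A (Python) =====
-- from typing import Dict, List, Union
--
-- def multiply_aug(data_aug: List[str], factor: int) -> List[str]:
--     """
--     The original idea here was to use to to speed up some vasp calculations for
--     supercells by initializing the entire CHGCAR file.
--     The current code does not deal with transformation of the Augemetation charges after regridding.
--
--     This is a naive way to multiply the Augmentation data in the CHGCAR,
--     a real working implementation will require analysis of the PAW projection operators.
--     However, even with such an implementation, the speed up will be minimal due to VASP's interal
--     minimization algorithms.
--     Args: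
--         data_aug: The original augmentation data from a CHGCAR
--         factor: The multiplication factor (some integer number of times it gets repeated)
--     Returns:
--         List of strings for each line of the Augmentation data.
--     """
--     res = []  # type: List[str]
--     cur_block = []  # type: List[str]
--     cnt = 0
--     for ll in data_aug:
--         if "augmentation" in ll:
--             if cur_block:
--                 for j in range(factor):
--                     cnt += 1
--                     cur_block[0] = f"augmentation occupancies{cnt:>4}{cur_block[0].split()[-1]:>4}\n"
--                     res.extend(cur_block)
--             cur_block = [ll]
--         else:
--             cur_block.append(ll)
--     else:
--         for j in range(factor):
--             cnt += 1
--             cur_block[0] = f"augmentation occupancies{cnt:>4}{cur_block[0].split()[-1]:>4}\n"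
--             res.extend(cur_block)
--     return res
-- ===== SOURCE B (Python) =====
-- def multiply_aug(data_aug, factor):
--     # Pass 1: split into blocks; a new block starts at every line containing
--     # "augmentation" (leading non-augmentation lines form the first block).
--     blocks = []
--     for ll in data_aug:
--         if "augmentation" in ll or not blocks:
--             blocks.append([ll])
--         else:
--             blocks[-1].append(ll)
--     # Pass 2: emit each block `factor` times with a renumbered header line.
--     res = []
--     cnt = 0
--     for block in blocks:
--         head, tail = block[0], block[1:]
--         for _ in range(factor):
--             cnt += 1
--             head = f"augmentation occupancies{cnt:>4}{head.split()[-1]:>4}\n"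
--             res.append(head)
--             res.extend(tail)
--     return res
-- ===== Notes on version B (the rewrite author's own statement) =====
-- stated objective: alternative
-- what changed: B replaces A's single streaming loop with deferred flush-at-boundary state into a two-pass decomposition: first split data_aug into augmentation blocks, then emit each block factor times with renumbered headers.
-- crash fix: On an empty data_aug with factor >= 1, A raises IndexError (cur_block[0] on the empty final block) while B returns []. — e.g. on multiply_aug([], 1): A raises IndexError, B returns []
import Mathlib
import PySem

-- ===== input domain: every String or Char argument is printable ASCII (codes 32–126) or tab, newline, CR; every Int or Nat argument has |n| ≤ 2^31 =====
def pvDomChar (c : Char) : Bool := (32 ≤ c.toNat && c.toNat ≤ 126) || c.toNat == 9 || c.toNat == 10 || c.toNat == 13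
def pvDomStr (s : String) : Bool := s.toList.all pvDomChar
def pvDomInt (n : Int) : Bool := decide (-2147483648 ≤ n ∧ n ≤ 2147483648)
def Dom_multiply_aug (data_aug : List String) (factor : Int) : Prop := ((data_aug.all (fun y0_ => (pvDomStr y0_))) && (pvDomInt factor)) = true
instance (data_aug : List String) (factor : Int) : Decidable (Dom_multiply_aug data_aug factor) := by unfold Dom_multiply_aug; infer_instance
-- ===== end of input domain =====

-- B rewrites A as two passes (split into augmentation blocks, then emit each block
-- `factor` times with renumbered headers); alternative decomposition, same cost.

-- shared f-string helper: both sources contain the identical f-string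
-- f"augmentation occupancies{cnt:>4}{tok:>4}\n" ('>4' = right-justify, space fill, width 4)
def pyRJ4 (cs : List Char) : List Char := List.replicate (4 - cs.length) ' ' ++ cs

def mkHeader (cnt : Int) (tok : String) : String :=
  String.ofList ("augmentation occupancies".toList ++ pyRJ4 (PySem.Int.toChars cnt) ++ pyRJ4 tok.toList ++ ['\n'])

-- `s.split()[-1]`; Python raises IndexError when the split is empty — that input is
-- excluded by Pre_, the port returns "" there.
def lastTok (s : String) : String := (PySem.Str.split₀ s).getLastD ""

-- ===== PORT A =====
-- the inner `for j in range(factor)` loop: mutates cur_block[0], extends res, bumps cnt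
def emitA (factor : Int) (res : List String) (blk : List String) (cnt : Int) :
    List String × List String × Int :=
  (PySem.List.pyRange 0 factor 1).foldl
    (fun st _ =>
      let cnt := st.2.2 + 1
      let head := mkHeader cnt (lastTok (st.2.1.headD ""))
      let blk := head :: st.2.1.tail
      (st.1 ++ blk, blk, cnt))
    (res, blk, cnt)

def multiply_aug (data_aug : List String) (factor : Int) : List String :=
  let st := data_aug.foldl
    (fun st ll =>
      if PySem.Str.isIn "augmentation" ll then
        if st.2.1.isEmpty then (st.1, [ll], st.2.2)
        else
          let e := emitA factor st.1 st.2.1 st.2.2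
          (e.1, [ll], e.2.2)
      else (st.1, st.2.1 ++ [ll], st.2.2))
    (([], [], 0) : List String × List String × Int)
  (emitA factor st.1 st.2.1 st.2.2).1

-- ===== PORT B =====
-- pass 1: split into blocks (a new block starts at every "augmentation" line)
def splitBlocks (data_aug : List String) : List (List String) :=
  data_aug.foldl
    (fun blocks ll =>
      if PySem.Str.isIn "augmentation" ll || blocks.isEmpty then blocks ++ [[ll]]
      else blocks.dropLast ++ [blocks.getLastD [] ++ [ll]])
    []

-- pass 2, one block: emit `factor` renumbered copies (state: res, cnt, current head)
def emitB (factor : Int) (st : List String × Int) (block : List String) : List String × Int :=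
  let tail := block.tail
  let r := (PySem.List.pyRange 0 factor 1).foldl
    (fun s _ =>
      let cnt := s.2.1 + 1
      let head := mkHeader cnt (lastTok s.2.2)
      (s.1 ++ (head :: tail), cnt, head))
    ((st.1, st.2, block.headD "") : List String × Int × String)
  (r.1, r.2.1)

def multiply_aug_alt (data_aug : List String) (factor : Int) : List String :=
  ((splitBlocks data_aug).foldl (emitB factor) (([], 0) : List String × Int)).1

-- ===== PRECONDITION & SPEC =====
-- Pre_ excludes exactly the inputs where the Python A raises IndexError (for factor ≥ 1:
-- an empty data_aug, or a first line with no whitespace-separated tokens).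
def Pre_multiply_aug (data_aug : List String) (factor : Int) : Prop :=
  1 ≤ factor → data_aug ≠ [] ∧ PySem.Str.split₀ (data_aug.headD "") ≠ []
instance (data_aug : List String) (factor : Int) : Decidable (Pre_multiply_aug data_aug factor) := by
  unfold Pre_multiply_aug; infer_instance

def pvWitness_multiply_aug : List String × Int :=
  (["augmentation occupancies   1   3\n", "  1 2 3\n", "augmentation occupancies   2   2\n", "  4 5\n"], 2)

-- On an empty data_aug with factor ≥ 1, A raises IndexError (cur_block[0] on the empty
-- final block); B naturally returns [] (no blocks to repeat).
def Raises_multiply_aug (data_aug : List String) (factor : Int) : Prop :=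
  data_aug = [] ∧ 1 ≤ factor
instance (data_aug : List String) (factor : Int) : Decidable (Raises_multiply_aug data_aug factor) := by
  unfold Raises_multiply_aug; infer_instance

def pvRaiseWitness_multiply_aug : List String × Int := ([], 1)
def pvRaiseWitnessOut_multiply_aug : List String := []

def Spec_multiply_aug (data_aug : List String) (factor : Int) (out : List String) : Prop := out = multiply_aug_alt data_aug factor
instance (data_aug : List String) (factor : Int) (out : List String) : Decidable (Spec_multiply_aug data_aug factor out) := by unfold Spec_multiply_aug; infer_instance

-- ===== CLAIM (what is proved, stated in full; the proofs are below) =====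
def Claim_equal_multiply_aug : Prop := ∀ (data_aug : List String) (factor : Int), Dom_multiply_aug data_aug factor → Pre_multiply_aug data_aug factor → Spec_multiply_aug data_aug factor (multiply_aug data_aug factor)

def Claim_raises_multiply_aug : Prop := (∀ (data_aug : List String) (factor : Int), Dom_multiply_aug data_aug factor → Raises_multiply_aug data_aug factor → ¬ Pre_multiply_aug data_aug factor) ∧ (Dom_multiply_aug (pvRaiseWitness_multiply_aug.1) (pvRaiseWitness_multiply_aug.2) ∧ Raises_multiply_aug (pvRaiseWitness_multiply_aug.1) (pvRaiseWitness_multiply_aug.2) ∧ multiply_aug_alt (pvRaiseWitness_multiply_aug.1) (pvRaiseWitness_multiply_aug.2) = pvRaiseWitnessOut_multiply_aug)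

-- ===== LEMMAS AND PROOFS =====

-- A's inner loop over a nonempty block equals B's inner loop carrying the head separately
theorem foldAB (t : List String) (l : List Int) :
    ∀ (res : List String) (cnt : Int) (h : String),
    l.foldl
      (fun st (_ : Int) =>
        let cnt := st.2.2 + 1
        let head := mkHeader cnt (lastTok (st.2.1.headD ""))
        let blk := head :: st.2.1.tail
        (st.1 ++ blk, blk, cnt))
      ((res, h :: t, cnt) : List String × List String × Int)
    = (fun (s : List String × Int × String) => (s.1, s.2.2 :: t, s.2.1))
      (l.foldl
        (fun s (_ : Int) =>
          let cnt := s.2.1 + 1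
          let head := mkHeader cnt (lastTok s.2.2)
          (s.1 ++ (head :: t), cnt, head))
        ((res, cnt, h) : List String × Int × String)) := by
  induction l with
  | nil => intro res cnt h; rfl
  | cons a l ih => intro res cnt h; simpa using ih _ _ _

theorem emitA_eq_emitB (factor : Int) (res : List String) (cnt : Int) (h : String) (t : List String) :
    ((emitA factor res (h :: t) cnt).1, (emitA factor res (h :: t) cnt).2.2)
      = emitB factor (res, cnt) (h :: t) := by
  unfold emitA emitB
  rw [foldAB]
  simp

-- proof-side recursive block gatherer
def gatherB (cur : List String) : List String → List (List String)
  | [] => [cur]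
  | l :: ls =>
    if PySem.Str.isIn "augmentation" l then cur :: gatherB [l] ls
    else gatherB (cur ++ [l]) ls

theorem splitBlocks_foldl_eq (ls : List String) :
    ∀ (bs : List (List String)) (cur : List String), cur ≠ [] →
    ls.foldl
      (fun blocks ll =>
        if PySem.Str.isIn "augmentation" ll || blocks.isEmpty then blocks ++ [[ll]]
        else blocks.dropLast ++ [blocks.getLastD [] ++ [ll]])
      (bs ++ [cur])
    = bs ++ gatherB cur ls := by
  induction ls with
  | nil => intro bs cur _; simp [gatherB]
  | cons l ls ih =>
    intro bs cur hcur
    by_cases hl : PySem.Str.isIn "augmentation" l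
    · simp only [List.foldl_cons, hl, Bool.true_or, if_pos, gatherB]
      have := ih (bs ++ [cur]) [l] (by simp)
      simpa using this
    · have hne : (bs ++ [cur]).isEmpty = false := by simp
      simp only [List.foldl_cons, hl, hne, Bool.or_self, Bool.false_eq_true, if_false, gatherB,
        List.dropLast_concat, List.getLastD_concat]
      exact ih bs (cur ++ [l]) (by simp)

theorem main_inv (factor : Int) (xs : List String) :
    ∀ (cur res : List String) (cnt : Int), cur ≠ [] →
    (let st := xs.foldl
        (fun st ll =>
          if PySem.Str.isIn "augmentation" ll then
            if st.2.1.isEmpty then (st.1, [ll], st.2.2)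
            else
              let e := emitA factor st.1 st.2.1 st.2.2
              (e.1, [ll], e.2.2)
          else (st.1, st.2.1 ++ [ll], st.2.2))
        ((res, cur, cnt) : List String × List String × Int)
     ((emitA factor st.1 st.2.1 st.2.2).1, (emitA factor st.1 st.2.1 st.2.2).2.2))
    = (gatherB cur xs).foldl (emitB factor) (res, cnt) := by
  induction xs with
  | nil =>
    intro cur res cnt hcur
    obtain ⟨h, t, rfl⟩ : ∃ h t, cur = h :: t := by
      cases cur with | nil => exact absurd rfl hcur | cons h t => exact ⟨h, t, rfl⟩
    simpa [gatherB] using emitA_eq_emitB factor res cnt h t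
  | cons l ls ih =>
    intro cur res cnt hcur
    obtain ⟨h, t, rfl⟩ : ∃ h t, cur = h :: t := by
      cases cur with | nil => exact absurd rfl hcur | cons h t => exact ⟨h, t, rfl⟩
    by_cases hl : PySem.Str.isIn "augmentation" l
    · have hE := emitA_eq_emitB factor res cnt h t
      simp only [List.foldl_cons, hl, if_pos, List.isEmpty_cons, Bool.false_eq_true, if_false,
        gatherB]
      rw [← hE]
      exact ih [l] _ _ (by simp)
    · simp only [List.foldl_cons, hl, Bool.false_eq_true, if_false, gatherB]
      exact ih (h :: t ++ [l]) res cnt (by simp)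

theorem pyRange_nonpos (factor : Int) (hf : factor ≤ 0) : PySem.List.pyRange 0 factor 1 = [] := by
  apply List.eq_nil_iff_forall_not_mem.mpr
  intro x hx
  have := (PySem.List.mem_pyRange_one (a := 0) (b := factor) (x := x)).mp hx
  omega

-- ===== VERDICT (by name: the statement is the Claim_ definition above) =====
theorem multiply_aug_spec : Claim_equal_multiply_aug := by
  intro data_aug factor _ hpre
  unfold Spec_multiply_aug
  cases data_aug with
  | nil =>
    have hf : factor ≤ 0 := by
      by_contra hc
      exact absurd rfl (hpre (by omega)).1
    simp [multiply_aug, multiply_aug_alt, splitBlocks, emitA, pyRange_nonpos factor hf]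
  | cons x xs =>
    have hblocks : splitBlocks (x :: xs) = gatherB [x] xs := by
      unfold splitBlocks
      rw [List.foldl_cons]
      have hstep : (if PySem.Str.isIn "augmentation" x || ([] : List (List String)).isEmpty
          then ([] : List (List String)) ++ [[x]]
          else ([] : List (List String)).dropLast ++ [([] : List (List String)).getLastD [] ++ [x]])
          = ([] : List (List String)) ++ [[x]] := by simp
      rw [hstep]
      exact splitBlocks_foldl_eq xs [] [x] (by simp)
    have hfirst : ∀ (st : List String × List String × Int), st = ([], ([] : List String), (0 : Int)) →
        (if PySem.Str.isIn "augmentation" x then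
          if st.2.1.isEmpty then (st.1, [x], st.2.2)
          else
            let e := emitA factor st.1 st.2.1 st.2.2
            (e.1, [x], e.2.2)
        else (st.1, st.2.1 ++ [x], st.2.2)) = (([] : List String), [x], (0 : Int)) := by
      intro st hst; subst hst
      split <;> simp
    have hmain := main_inv factor xs [x] [] 0 (by simp)
    unfold multiply_aug multiply_aug_alt
    rw [hblocks, List.foldl_cons, hfirst _ rfl]
    exact congrArg Prod.fst hmain

@[simp] theorem multiply_aug_raises : Claim_raises_multiply_aug := by
  unfold Claim_raises_multiply_aug
  constructor
  · intro data_aug factor _ hr hpre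
    obtain ⟨rfl, hf⟩ := hr
    exact absurd rfl (hpre hf).1
  · refine ⟨by decide, by decide, by decide⟩
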